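-- pv_equiv track=rewrite | github.com/smkwray/cogdiff | scripts/08_invariance_and_partial.py | _flatten_indicators
-- ===== SOURCE A (Python) =====
-- def _flatten_indicators(indicator_map: dict[str, list[str]]) -> list[str]:
--     out: list[str] = []
--     seen: set[str] = set()
--     for indicators in indicator_map.values():
--         for indicator in indicators:
--             token = str(indicator).strip()
--             if token and token not in seen:
--                 seen.add(token)
--                 out.append(token)
--     return out
-- ===== SOURCE B (Python) =====
-- def _flatten_indicators(indicator_map: dict[str, list[str]]) -> list[str]:
--     flat = [str(x).strip() for vs in indicator_map.values() for x in vs]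
--     first = {t: i for i, t in reversed(list(enumerate(flat))) if t}
--     return sorted(first, key=first.get)
-- ===== Notes on version B (the rewrite author's own statement) =====
-- stated objective: alternative
-- what changed: Replaces the streaming seen-set dedup by a positional algorithm: flatten all stripped tokens, build a first-occurrence-index map by a reversed dict comprehension (later, i.e. earlier-index, writes win), then sort the distinct tokens by that first index.
import Mathlib
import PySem

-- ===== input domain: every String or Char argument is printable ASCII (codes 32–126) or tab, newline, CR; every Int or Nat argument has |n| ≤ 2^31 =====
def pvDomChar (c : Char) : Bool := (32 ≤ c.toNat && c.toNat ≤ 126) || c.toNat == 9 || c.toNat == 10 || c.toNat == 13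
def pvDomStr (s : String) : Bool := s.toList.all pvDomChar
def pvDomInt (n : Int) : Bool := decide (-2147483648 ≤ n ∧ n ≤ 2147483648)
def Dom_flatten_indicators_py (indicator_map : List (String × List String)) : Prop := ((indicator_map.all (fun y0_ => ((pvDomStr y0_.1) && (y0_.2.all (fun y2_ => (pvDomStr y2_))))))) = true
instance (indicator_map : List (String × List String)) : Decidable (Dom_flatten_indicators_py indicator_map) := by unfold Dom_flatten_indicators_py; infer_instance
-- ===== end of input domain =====

-- B replaces A's streaming seen-set dedup by a positional algorithm: flatten all stripped
-- tokens, build a first-occurrence-index map by a reversed dict comprehension, sort by it.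

-- ===== PORT A =====
def flatten_indicators_py (indicator_map : List (String × List String)) : List String :=
  (indicator_map.foldl
    (fun st kv =>
      kv.2.foldl
        (fun st indicator =>
          let token := PySem.Str.strip indicator
          if token ≠ "" ∧ PySem.Set.contains st.2 token = false then
            (st.1 ++ [token], PySem.Set.add st.2 token)
          else st)
        st)
    (([] : List String), (PySem.Set.empty : PySem.Set String))).1

-- ===== PORT B =====
def flatten_indicators_py_alt (indicator_map : List (String × List String)) : List String :=
  let flat := indicator_map.flatMap (fun kv => kv.2.map PySem.Str.strip)
  -- {t: i for i, t in reversed(list(enumerate(flat))) if t}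
  let first := ((PySem.List.enumerate flat 0).reverse.filter (fun it => it.2 != "")).foldl
      (fun d it => d.insert it.2 it.1) (PySem.Dict.empty : PySem.Dict String Int)
  -- sorted(first, key=first.get); first.get k is the stored index for every key k,
  -- so it is ported as getD with a default that is never read
  PySem.List.sorted first.keys (fun t => first.getD t 0) false

-- ===== PRECONDITION & SPEC =====
def Spec_flatten_indicators_py (indicator_map : List (String × List String)) (out : List String) : Prop := out = flatten_indicators_py_alt indicator_map
instance (indicator_map : List (String × List String)) (out : List String) : Decidable (Spec_flatten_indicators_py indicator_map out) := by unfold Spec_flatten_indicators_py; infer_instance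

-- ===== CLAIM (what is proved, stated in full; the proofs are below) =====
def Claim_equal_flatten_indicators_py : Prop := ∀ (indicator_map : List (String × List String)), Dom_flatten_indicators_py indicator_map → Spec_flatten_indicators_py indicator_map (flatten_indicators_py indicator_map)

-- ===== LEMMAS AND PROOFS =====

-- A-side: the seen set evolves per indicator exactly like the output list
def pvStep (s : PySem.Set String) (indicator : String) : PySem.Set String :=
  if PySem.Str.strip indicator ≠ "" then PySem.Set.add s (PySem.Str.strip indicator) else s

theorem pv_inner (xs : List String) (s : PySem.Set String) :
    xs.foldl
      (fun st indicator =>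
        let token := PySem.Str.strip indicator
        if token ≠ "" ∧ PySem.Set.contains st.2 token = false then
          (st.1 ++ [token], PySem.Set.add st.2 token)
        else st)
      (s, s) = (xs.foldl pvStep s, xs.foldl pvStep s) := by
  induction xs generalizing s with
  | nil => rfl
  | cons x xs ih =>
    simp only [List.foldl_cons]
    have hstep :
        (let token := PySem.Str.strip x
         if token ≠ "" ∧ PySem.Set.contains s token = false then
           (s ++ [token], PySem.Set.add s token)
         else (s, s)) = (pvStep s x, pvStep s x) := by
      simp only [pvStep, PySem.Set.add]
      split_ifs with h1 h2 h3 <;>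
        simp_all [PySem.Set.contains_eq_listContains, List.contains_eq_mem]
    rw [hstep]
    exact ih (pvStep s x)

theorem pv_outer (m : List (String × List String)) (s : PySem.Set String) :
    m.foldl
      (fun st kv =>
        kv.2.foldl
          (fun st indicator =>
            let token := PySem.Str.strip indicator
            if token ≠ "" ∧ PySem.Set.contains st.2 token = false then
              (st.1 ++ [token], PySem.Set.add st.2 token)
            else st)
          st)
      (s, s)
      = (m.foldl (fun s kv => kv.2.foldl pvStep s) s,
         m.foldl (fun s kv => kv.2.foldl pvStep s) s) := by
  induction m generalizing s with
  | nil => rfl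
  | cons kv m ih =>
    simp only [List.foldl_cons]
    rw [pv_inner]
    exact ih _

-- A's output is the distinct non-empty stripped tokens in first-occurrence order
theorem pvA_eq (m : List (String × List String)) :
    flatten_indicators_py m
      = PySem.Set.ofList
          ((m.flatMap (fun kv => kv.2.map PySem.Str.strip)).filter (fun t => t != "")) := by
  unfold flatten_indicators_py
  rw [show (PySem.Set.empty : PySem.Set String) = ([] : List String) from rfl, pv_outer]
  rw [PySem.Set.ofList_eq_foldl, List.foldl_filter, List.foldl_flatMap]
  dsimp only
  congr 1
  funext s kv
  rw [List.foldl_map]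
  congr 1
  funext s x
  simp [pvStep]

-- B-side: the last write wins in a left fold of inserts
theorem pv_get_fold (l : List (Int × String)) (d : PySem.Dict String Int) (t : String) :
    (l.foldl (fun d it => d.insert it.2 it.1) d).get? t =
      match l.reverse.find? (fun it => it.2 == t) with
      | some it => some it.1
      | none => d.get? t := by
  induction l generalizing d with
  | nil => rfl
  | cons x xs ih =>
    simp only [List.foldl_cons, List.reverse_cons, List.find?_append]
    rw [ih]
    rcases h : xs.reverse.find? (fun it => it.2 == t) with _ | it
    · rw [h]
      rcases x with ⟨i, w⟩
      by_cases hw : w = t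
      · subst hw; simp
      · simp [PySem.Dict.get?_insert, hw, Ne.symm hw]
    · rw [h]; simp

-- a find? for elements the filter never drops
theorem pv_find_filter (l : List (Int × String)) (t : String) (ht : t ≠ "") :
    (l.filter (fun it => it.2 != "")).find? (fun it => it.2 == t)
      = l.find? (fun it => it.2 == t) := by
  induction l with
  | nil => rfl
  | cons x xs ih =>
    by_cases hx : x.2 = t
    · simp [hx, ht]
    · by_cases hp : x.2 = ""
      · simp [hp, ih, Ne.symm ht]
      · simp [hp, hx, ih]

-- find? over an enumeration returns the first index of the element
theorem pv_find_enum (l : List String) (t : String) (s : Int) :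
    (PySem.List.enumerate l s).find? (fun it => it.2 == t)
      = if t ∈ l then some (s + (l.idxOf t : Int), t) else none := by
  induction l generalizing s with
  | nil => simp [PySem.List.enumerate_nil]
  | cons x xs ih =>
    rw [PySem.List.enumerate_cons, List.find?_cons]
    by_cases hx : x = t
    · subst hx
      simp [List.idxOf_cons_self]
    · have hb : (((s, x) : Int × String).2 == t) = false := by simp [hx]
      rw [ih (s + 1)]
      by_cases hm : t ∈ xs
      · rw [if_pos hm, if_pos (List.mem_cons_of_mem _ hm), List.idxOf_cons_ne _ hx, hb]
        simp only [Nat.succ_eq_add_one, Option.some.injEq, Prod.mk.injEq]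
        refine ⟨by push_cast; ring, trivial⟩
      · have hnm : t ∉ x :: xs := by
          simp only [List.mem_cons, not_or]
          exact ⟨fun h => hx h.symm, hm⟩
        rw [if_neg hm, hb, if_neg hnm]

-- the first-index dict B builds, named for the proofs
def pvFirst (flat : List String) : PySem.Dict String Int :=
  ((PySem.List.enumerate flat 0).reverse.filter (fun it => it.2 != "")).foldl
    (fun d it => d.insert it.2 it.1) PySem.Dict.empty

theorem pv_alt_eq (m : List (String × List String)) :
    flatten_indicators_py_alt m
      = PySem.List.sorted
          (pvFirst (m.flatMap (fun kv => kv.2.map PySem.Str.strip))).keys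
          (fun t => (pvFirst (m.flatMap (fun kv => kv.2.map PySem.Str.strip))).getD t 0)
          false := rfl

-- the dict maps each kept token to its first index in flat
theorem pv_first_get (flat : List String) (t : String) (ht : t ≠ "") :
    (pvFirst flat).get? t = if t ∈ flat then some (flat.idxOf t : Int) else none := by
  unfold pvFirst
  rw [pv_get_fold, List.filter_reverse, List.reverse_reverse, pv_find_filter _ _ ht,
    pv_find_enum]
  by_cases hm : t ∈ flat
  · simp [hm]
  · simp [hm, PySem.Dict.get?_empty]

theorem pv_keys (flat : List String) :
    (pvFirst flat).keys = PySem.Set.ofList (flat.reverse.filter (fun t => t != "")) := by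
  unfold pvFirst
  refine Eq.trans
    (PySem.Dict.keys_foldl_insert_key _ (fun it : Int × String => it.2)
      (fun _ it => it.1) PySem.Dict.empty) ?_
  rw [show (PySem.Dict.empty : PySem.Dict String Int).keys = ([] : List String) from rfl,
    PySem.Set.update_nil_left]
  congr 1
  rw [show (PySem.List.enumerate flat 0).reverse.filter (fun it => it.2 != "")
        = (PySem.List.enumerate flat 0).reverse.filter
            ((fun t => t != "") ∘ (fun it : Int × String => it.2)) from rfl,
    ← List.filter_map, List.map_reverse, PySem.List.map_snd_enumerate]

-- distinct kept elements are ordered by their index in the source list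
theorem pv_pairwise (l : List String) (p : String → Bool) :
    (PySem.Set.ofList (l.filter p)).Pairwise (fun a b => l.idxOf a < l.idxOf b) := by
  induction l with
  | nil => simp
  | cons x xs ih =>
    by_cases hp : p x
    · rw [List.filter_cons_of_pos hp, PySem.Set.ofList_cons, List.pairwise_cons]
      constructor
      · intro b hb
        have hbx : b ≠ x := ((PySem.Set.mem_discard _ _ _).mp hb).2
        rw [List.idxOf_cons_self, List.idxOf_cons_ne _ (Ne.symm hbx)]
        omega
      · have hdisc : (PySem.Set.ofList (xs.filter p)).discard x
            = (PySem.Set.ofList (xs.filter p)).filter (fun y => y != x) := rfl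
        rw [hdisc]
        refine List.Pairwise.imp_of_mem ?_ (List.Pairwise.filter _ ih)
        intro a b ha hb hrel
        have hax : a ≠ x := by simpa using (List.mem_filter.mp ha).2
        have hbx : b ≠ x := by simpa using (List.mem_filter.mp hb).2
        rw [List.idxOf_cons_ne _ (Ne.symm hax), List.idxOf_cons_ne _ (Ne.symm hbx)]
        omega
    · rw [List.filter_cons_of_neg hp]
      refine List.Pairwise.imp_of_mem ?_ ih
      intro a b ha hb hrel
      have hamem := List.mem_filter.mp ((PySem.Set.mem_ofList _ _).mp ha)
      have hbmem := List.mem_filter.mp ((PySem.Set.mem_ofList _ _).mp hb)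
      have hax : a ≠ x := fun h => hp (h ▸ hamem.2)
      have hbx : b ≠ x := fun h => hp (h ▸ hbmem.2)
      rw [List.idxOf_cons_ne _ (Ne.symm hax), List.idxOf_cons_ne _ (Ne.symm hbx)]
      omega

-- ===== VERDICT (by name: the statement is the Claim_ definition above) =====
theorem flatten_indicators_py_spec : Claim_equal_flatten_indicators_py := by
  intro m _
  unfold Spec_flatten_indicators_py
  rw [pvA_eq, pv_alt_eq]
  set flat := m.flatMap (fun kv => kv.2.map PySem.Str.strip) with hflat
  refine (PySem.List.sorted_eq_of_perm_of_pairwise_lt _ _ _ ?_ ?_).symm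
  · rw [pv_keys]
    refine (List.perm_ext_iff_of_nodup (PySem.Set.nodup_ofList _) (PySem.Set.nodup_ofList _)).mpr ?_
    intro a
    simp only [PySem.Set.mem_ofList, List.mem_filter, List.mem_reverse]
  · refine List.Pairwise.imp_of_mem ?_ (pv_pairwise flat (fun t => t != ""))
    intro a b ha hb hrel
    have hamem := List.mem_filter.mp ((PySem.Set.mem_ofList _ _).mp ha)
    have hbmem := List.mem_filter.mp ((PySem.Set.mem_ofList _ _).mp hb)
    have hane : a ≠ "" := by simpa using hamem.2
    have hbne : b ≠ "" := by simpa using hbmem.2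
    have hga := pv_first_get flat a hane
    have hgb := pv_first_get flat b hbne
    rw [if_pos hamem.1] at hga
    rw [if_pos hbmem.1] at hgb
    rw [PySem.Dict.getD_eq_get?_getD, PySem.Dict.getD_eq_get?_getD, hga, hgb]
    simpa using hrel
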